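-- pv_equiv track=rewrite | github.com/mildsunrise/finite-algebra | groups.py | circular_pairwise
-- ===== SOURCE A (Python) =====
-- from typing import Optional, ClassVar, Iterator, Iterable, Any, Type, TypeVar, Union, cast
--
-- T = TypeVar('T')
--
-- def circular_pairwise(x: Iterable[T]) -> Iterator[tuple[T, T]]:
-- 	''' like pairwise, but with a trailing (last, first) entry '''
-- 	x = iter(x)
-- 	start = next(x)
-- 	e1 = start
-- 	for e2 in x:
-- 		yield (e1, e2)
-- 		e1 = e2
-- 	yield (e1, start)
-- ===== SOURCE B (Python) =====
-- def circular_pairwise(x):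
--     ''' like pairwise, but with a trailing (last, first) entry '''
--     it = iter(x)
--     start = next(it)          # empty input raises, as in A
--     seq = [start, *it]
--     n = len(seq)
--     for i in range(n):
--         yield (seq[i], seq[(i + 1) % n])
-- ===== Notes on version B (the rewrite author's own statement) =====
-- stated objective: alternative
-- what changed: B materializes the input into a list and produces each pair by modular random-access indexing seq[i], seq[(i+1)%n], instead of A's streaming loop that tracks a running prev element and emits the (last, first) pair as a separate trailing yield.
import Mathlib
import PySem

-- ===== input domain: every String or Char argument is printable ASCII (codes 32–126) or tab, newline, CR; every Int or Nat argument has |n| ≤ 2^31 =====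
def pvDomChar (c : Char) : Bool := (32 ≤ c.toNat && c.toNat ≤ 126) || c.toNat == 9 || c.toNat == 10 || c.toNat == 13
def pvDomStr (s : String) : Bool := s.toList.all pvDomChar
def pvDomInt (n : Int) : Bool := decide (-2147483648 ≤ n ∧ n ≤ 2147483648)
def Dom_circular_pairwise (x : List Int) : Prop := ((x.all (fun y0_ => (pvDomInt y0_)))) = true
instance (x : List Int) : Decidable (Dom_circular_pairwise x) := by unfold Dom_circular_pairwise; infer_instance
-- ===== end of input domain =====

-- B replaces A's streaming prev-tracking loop (with a separate trailing (last, first) yield)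
-- by a materialized list indexed with modular wraparound; same cost, different decomposition.

-- ===== PORT A =====
-- A's for-loop: e1 is the running previous element; the final (e1, start) yield
-- is the base case when the iterator is exhausted.
def circular_pairwise_loopA (e1 : Int) (rest : List Int) (start : Int) : List (Int × Int) :=
  match rest with
  | [] => [(e1, start)]
  | e2 :: t => (e1, e2) :: circular_pairwise_loopA e2 t start

def circular_pairwise (x : List Int) : List (Int × Int) :=
  match x with
  | [] => []  -- Python raises here (RuntimeError from next(it)); excluded by Pre_
  | start :: rest => circular_pairwise_loopA start rest start

-- ===== PORT B =====
def circular_pairwise_alt (x : List Int) : List (Int × Int) :=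
  match x with
  | [] => []  -- Python raises here (RuntimeError from next(it)); excluded by Pre_
  | start :: rest =>
    let seq := start :: rest
    let n := seq.length
    (List.range n).map (fun i => (seq.getD i 0, seq.getD ((i + 1) % n) 0))

-- ===== PRECONDITION & SPEC =====
-- Pre_ excludes exactly the empty input, on which both Pythons raise RuntimeError.
def Pre_circular_pairwise (x : List Int) : Prop := x ≠ []
instance (x : List Int) : Decidable (Pre_circular_pairwise x) := by unfold Pre_circular_pairwise; infer_instance
def pvWitness_circular_pairwise : List Int := [1, 2, 3]
def Spec_circular_pairwise (x : List Int) (out : List (Int × Int)) : Prop := out = circular_pairwise_alt x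
instance (x : List Int) (out : List (Int × Int)) : Decidable (Spec_circular_pairwise x out) := by unfold Spec_circular_pairwise; infer_instance

-- ===== CLAIM (what is proved, stated in full; the proofs are below) =====
def Claim_equal_circular_pairwise : Prop := ∀ (x : List Int), Dom_circular_pairwise x → Pre_circular_pairwise x → Spec_circular_pairwise x (circular_pairwise x)

-- ===== LEMMAS AND PROOFS =====

-- A's loop zips the remaining elements with their successors, closing with start.
theorem loopA_eq_zip (rest : List Int) (e1 start : Int) :
    circular_pairwise_loopA e1 rest start = List.zip (e1 :: rest) (rest ++ [start]) := by
  induction rest generalizing e1 with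
  | nil => simp [circular_pairwise_loopA]
  | cons e2 t ih => simp [circular_pairwise_loopA, ih, List.zip]

-- B's indexed map equals the same zip.
theorem mapB_eq_zip (start : Int) (rest : List Int) :
    (List.range (rest.length + 1)).map
      (fun i => ((start :: rest).getD i 0, (start :: rest).getD ((i + 1) % (rest.length + 1)) 0))
    = List.zip (start :: rest) (rest ++ [start]) := by
  apply List.ext_getElem
  · simp
  · intro i h1 h2
    simp only [List.getElem_map, List.getElem_range, List.getElem_zip]
    simp only [List.length_map, List.length_range] at h1
    refine Prod.ext ?_ ?_
    · rw [List.getD_eq_getElem _ _ (by simpa using h1)]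
    · by_cases hi : i + 1 < rest.length + 1
      · rw [Nat.mod_eq_of_lt hi, List.getD_eq_getElem _ _ (by simp; omega)]
        have hir : i < rest.length := by omega
        simp [hir]
      · have hie : i = rest.length := by omega
        subst hie
        simp [Nat.mod_self, List.getElem_append_right]

-- ===== VERDICT (by name: the statement is the Claim_ definition above) =====
theorem circular_pairwise_spec : Claim_equal_circular_pairwise := by
  intro x _ hpre
  unfold Spec_circular_pairwise
  match x with
  | [] => exact absurd rfl hpre
  | start :: rest =>
    show circular_pairwise_loopA start rest start = _
    rw [loopA_eq_zip]
    simp only [circular_pairwise_alt, List.length_cons]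
    rw [mapB_eq_zip]
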